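-- pv_equiv track=rewrite | github.com/MaxFriedman123/PredictionArbitrage | cross_platform_matcher.py | _detect_league_from_slug
-- ===== SOURCE A (Python) =====
-- LEAGUE_MAPPING = {
--     # Kalshi series -> standard league name
--     'KXNBAGAME': 'NBA', 'KXNHLGAME': 'NHL', 'KXNFLGAME': 'NFL',
--     'KXMLBGAME': 'MLB', 'KXWNBAGAME': 'WNBA',
--     'KXNCAAMBGAME': 'NCAAMB', 'KXNCAAWBGAME': 'NCAAWB',
--     'KXNCAAFGAME': 'NCAAF', 'KXNCAABGAME': 'NCAAMB',
--     'KXNCAAHOCKEYGAME': 'NCAAHOCKEY', 'KXNCAALAXGAME': 'NCAALAX',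
--     'KXUFCFIGHT': 'UFC', 'KXBOXINGFIGHT': 'BOXING',
--     'KXUNRIVALEDGAME': 'UNRIVALED', 'KXEUROLEAGUEGAME': 'EUROLEAGUE',
--     'KXEUROCUPGAME': 'EUROCUP', 'KXKBLGAME': 'KBL',
--     'KXCBAGAME': 'CBA', 'KXJBLEAGUEGAME': 'JBLEAGUE',
--     'KXNBLGAME': 'NBL',
--     'KXAHLGAME': 'AHL', 'KXKHLGAME': 'KHL', 'KXSHLGAME': 'SHL',
--     'KXATPGAME': 'ATP', 'KXWTAGAME': 'WTA',
--     'KXLOLGAME': 'LOL', 'KXCS2GAME': 'CS2',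
--     'KXVALORANTGAME': 'VALORANT', 'KXDOTA2GAME': 'DOTA2',
--     # Polymarket series -> standard league name
--     'NBA': 'NBA', 'NHL': 'NHL', 'NFL': 'NFL', 'MLB': 'MLB',
--     'UFC': 'UFC', 'BOXING': 'BOXING', 'TENNIS': 'TENNIS',
--     'CBB': 'NCAAMB', 'NCAAMB': 'NCAAMB',
--     'CWBB': 'NCAAWB', 'NCAAWB': 'NCAAWB',
--     'CFB': 'NCAAF', 'NCAAF': 'NCAAF',
-- }
--
-- def normalize_league(league_raw: str) -> str:
--     """Map platform-specific league codes to standard name."""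
--     return LEAGUE_MAPPING.get(league_raw.upper().strip(), league_raw.upper().strip())
--
-- def _detect_league_from_slug(slug: str, tag_league: str) -> str:
--     """Detect the league from a Polymarket event slug like 'nba-phi-nyk-2025-10-02'."""
--     slug_lower = slug.lower()
--     league_prefixes = [
--         ('nba-', 'NBA'), ('nhl-', 'NHL'), ('nfl-', 'NFL'), ('mlb-', 'MLB'),
--         ('ufc-', 'UFC'), ('wnba-', 'WNBA'), ('ncaab-', 'NCAAMB'),
--         ('ncaaf-', 'NCAAF'), ('ncaaw-', 'NCAAWB'),
--     ]
--     for prefix, league in league_prefixes: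
--         if slug_lower.startswith(prefix):
--             return league
--     return normalize_league(tag_league)
-- ===== SOURCE B (Python) =====
-- LEAGUE_MAPPING = {
--     'KXNBAGAME': 'NBA', 'KXNHLGAME': 'NHL', 'KXNFLGAME': 'NFL',
--     'KXMLBGAME': 'MLB', 'KXWNBAGAME': 'WNBA',
--     'KXNCAAMBGAME': 'NCAAMB', 'KXNCAAWBGAME': 'NCAAWB',
--     'KXNCAAFGAME': 'NCAAF', 'KXNCAABGAME': 'NCAAMB',
--     'KXNCAAHOCKEYGAME': 'NCAAHOCKEY', 'KXNCAALAXGAME': 'NCAALAX',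
--     'KXUFCFIGHT': 'UFC', 'KXBOXINGFIGHT': 'BOXING',
--     'KXUNRIVALEDGAME': 'UNRIVALED', 'KXEUROLEAGUEGAME': 'EUROLEAGUE',
--     'KXEUROCUPGAME': 'EUROCUP', 'KXKBLGAME': 'KBL',
--     'KXCBAGAME': 'CBA', 'KXJBLEAGUEGAME': 'JBLEAGUE',
--     'KXNBLGAME': 'NBL',
--     'KXAHLGAME': 'AHL', 'KXKHLGAME': 'KHL', 'KXSHLGAME': 'SHL',
--     'KXATPGAME': 'ATP', 'KXWTAGAME': 'WTA',
--     'KXLOLGAME': 'LOL', 'KXCS2GAME': 'CS2',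
--     'KXVALORANTGAME': 'VALORANT', 'KXDOTA2GAME': 'DOTA2',
--     'NBA': 'NBA', 'NHL': 'NHL', 'NFL': 'NFL', 'MLB': 'MLB',
--     'UFC': 'UFC', 'BOXING': 'BOXING', 'TENNIS': 'TENNIS',
--     'CBB': 'NCAAMB', 'NCAAMB': 'NCAAMB',
--     'CWBB': 'NCAAWB', 'NCAAWB': 'NCAAWB',
--     'CFB': 'NCAAF', 'NCAAF': 'NCAAF',
-- }
--
-- def normalize_league(league_raw: str) -> str:
--     """Map platform-specific league codes to standard name."""
--     return LEAGUE_MAPPING.get(league_raw.upper().strip(), league_raw.upper().strip())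
--
-- _SLUG_PREFIX = {
--     'nba': 'NBA', 'nhl': 'NHL', 'nfl': 'NFL', 'mlb': 'MLB',
--     'ufc': 'UFC', 'wnba': 'WNBA', 'ncaab': 'NCAAMB',
--     'ncaaf': 'NCAAF', 'ncaaw': 'NCAAWB',
-- }
--
-- def _detect_league_from_slug(slug: str, tag_league: str) -> str:
--     """Detect the league from a Polymarket event slug like 'nba-phi-nyk-2025-10-02'."""
--     key, sep, _ = slug.lower().partition('-')
--     if sep and key in _SLUG_PREFIX:
--         return _SLUG_PREFIX[key]
--     return normalize_league(tag_league)
-- ===== Notes on version B (the rewrite author's own statement) =====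
-- stated objective: idiomatic
-- what changed: Replaces the sequential startswith scan over nine '<tok>-' prefixes with str.partition('-') to extract the leading token and a single dict lookup in a module-level prefix table.
import Mathlib
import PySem

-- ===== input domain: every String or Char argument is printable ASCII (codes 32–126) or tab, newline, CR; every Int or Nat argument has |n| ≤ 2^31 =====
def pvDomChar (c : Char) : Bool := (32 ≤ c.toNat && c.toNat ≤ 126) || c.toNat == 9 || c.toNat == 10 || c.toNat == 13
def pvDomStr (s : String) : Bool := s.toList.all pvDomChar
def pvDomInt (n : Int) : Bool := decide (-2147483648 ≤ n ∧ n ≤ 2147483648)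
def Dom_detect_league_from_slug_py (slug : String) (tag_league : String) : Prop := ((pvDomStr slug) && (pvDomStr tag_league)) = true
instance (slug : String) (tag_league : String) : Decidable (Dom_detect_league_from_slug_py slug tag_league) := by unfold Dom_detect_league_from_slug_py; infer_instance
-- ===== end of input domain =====

-- B replaces A's sequential startswith scan over nine "<tok>-" prefixes with partition('-') plus one table lookup (idiomatic; same behaviour).


-- ===== PORT A =====
-- module-level LEAGUE_MAPPING dict (shared by both Pythons' normalize_league helper)
def pvLeagueMapping : PySem.Dict String String := PySem.Dict.ofList [
  ("KXNBAGAME", "NBA"), ("KXNHLGAME", "NHL"), ("KXNFLGAME", "NFL"),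
  ("KXMLBGAME", "MLB"), ("KXWNBAGAME", "WNBA"),
  ("KXNCAAMBGAME", "NCAAMB"), ("KXNCAAWBGAME", "NCAAWB"),
  ("KXNCAAFGAME", "NCAAF"), ("KXNCAABGAME", "NCAAMB"),
  ("KXNCAAHOCKEYGAME", "NCAAHOCKEY"), ("KXNCAALAXGAME", "NCAALAX"),
  ("KXUFCFIGHT", "UFC"), ("KXBOXINGFIGHT", "BOXING"),
  ("KXUNRIVALEDGAME", "UNRIVALED"), ("KXEUROLEAGUEGAME", "EUROLEAGUE"),
  ("KXEUROCUPGAME", "EUROCUP"), ("KXKBLGAME", "KBL"),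
  ("KXCBAGAME", "CBA"), ("KXJBLEAGUEGAME", "JBLEAGUE"),
  ("KXNBLGAME", "NBL"),
  ("KXAHLGAME", "AHL"), ("KXKHLGAME", "KHL"), ("KXSHLGAME", "SHL"),
  ("KXATPGAME", "ATP"), ("KXWTAGAME", "WTA"),
  ("KXLOLGAME", "LOL"), ("KXCS2GAME", "CS2"),
  ("KXVALORANTGAME", "VALORANT"), ("KXDOTA2GAME", "DOTA2"),
  ("NBA", "NBA"), ("NHL", "NHL"), ("NFL", "NFL"), ("MLB", "MLB"),
  ("UFC", "UFC"), ("BOXING", "BOXING"), ("TENNIS", "TENNIS"),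
  ("CBB", "NCAAMB"), ("NCAAMB", "NCAAMB"),
  ("CWBB", "NCAAWB"), ("NCAAWB", "NCAAWB"),
  ("CFB", "NCAAF"), ("NCAAF", "NCAAF")]

-- normalize_league (same module helper, used by both Pythons as the fallback)
def normalize_league_py (league_raw : String) : String :=
  PySem.Dict.getD pvLeagueMapping (PySem.Str.strip (PySem.Str.upper league_raw))
    (PySem.Str.strip (PySem.Str.upper league_raw))

-- the for-loop of A: first prefix match wins, else fall through
def pvScanA (slug_lower : String) : List (String × String) → Option String
  | [] => none
  | (pre, league) :: rest =>
      if PySem.Str.startswith slug_lower pre then some league else pvScanA slug_lower rest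

def detect_league_from_slug_py (slug : String) (tag_league : String) : String :=
  let slug_lower := PySem.Str.lower slug
  let league_prefixes : List (String × String) :=
    [("nba-", "NBA"), ("nhl-", "NHL"), ("nfl-", "NFL"), ("mlb-", "MLB"),
     ("ufc-", "UFC"), ("wnba-", "WNBA"), ("ncaab-", "NCAAMB"),
     ("ncaaf-", "NCAAF"), ("ncaaw-", "NCAAWB")]
  match pvScanA slug_lower league_prefixes with
  | some league => league
  | none => normalize_league_py tag_league

-- ===== PORT B =====
-- _SLUG_PREFIX dict (association list, first match = dict lookup: keys distinct)
def pvSlugPrefix : List (String × String) :=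
  [("nba", "NBA"), ("nhl", "NHL"), ("nfl", "NFL"), ("mlb", "MLB"),
   ("ufc", "UFC"), ("wnba", "WNBA"), ("ncaab", "NCAAMB"),
   ("ncaaf", "NCAAF"), ("ncaaw", "NCAAWB")]

-- key, sep, _ = slug.lower().partition('-')  ported by hand: key = chars before the
-- first '-', sep truthy ⟺ '-' occurs in the string (exact for partition on one char)
def detect_league_from_slug_py_alt (slug : String) (tag_league : String) : String :=
  let sl := PySem.Str.lower slug
  let key : String := String.ofList (sl.toList.takeWhile (fun c => !(c == '-')))
  let sep : Bool := decide ('-' ∈ sl.toList)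
  match sep, pvSlugPrefix.find? (fun p => p.1 == key) with
  | true, some p => p.2
  | _, _ => normalize_league_py tag_league

-- ===== PRECONDITION & SPEC =====
def Spec_detect_league_from_slug_py (slug : String) (tag_league : String) (out : String) : Prop := out = detect_league_from_slug_py_alt slug tag_league
instance (slug : String) (tag_league : String) (out : String) : Decidable (Spec_detect_league_from_slug_py slug tag_league out) := by unfold Spec_detect_league_from_slug_py; infer_instance

-- ===== CLAIM (what is proved, stated in full; the proofs are below) =====
def Claim_equal_detect_league_from_slug_py : Prop := ∀ (slug : String) (tag_league : String), Dom_detect_league_from_slug_py slug tag_league → Spec_detect_league_from_slug_py slug tag_league (detect_league_from_slug_py slug tag_league)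

-- ===== LEMMAS AND PROOFS =====

lemma pv_find?_cons_if {α : Type} (p : α → Bool) (a : α) (l : List α) :
    List.find? p (a :: l) = if p a then some a else List.find? p l := by
  by_cases h : p a <;> simp [h]

-- l starts with t ++ "-"  ⟺  the chunk of l before its first '-' is exactly t (and l has a '-')
lemma pv_prefix_dash_iff (t l : List Char) (ht : '-' ∉ t) :
    (t ++ ['-']) <+: l ↔ (l.takeWhile (fun c => !(c == '-')) = t ∧ '-' ∈ l) := by
  constructor
  · rintro ⟨r, rfl⟩
    constructor
    · have hts : t.takeWhile (fun c => !(c == '-')) = t :=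
        List.takeWhile_eq_self_iff.mpr (by intro a ha; simp only [Bool.not_eq_eq_eq_not,
          Bool.not_true, beq_eq_false_iff_ne, ne_eq]; rintro rfl; exact ht ha)
      rw [List.append_assoc, List.takeWhile_append, hts]
      simp
    · simp
  · rintro ⟨hk, hm⟩
    have hsplit := List.takeWhile_append_dropWhile (p := fun c => !(c == '-')) (l := l)
    cases hdw : l.dropWhile (fun c => !(c == '-')) with
    | nil =>
      exfalso
      rw [← hsplit, hdw, List.append_nil, hk] at hm
      exact ht hm
    | cons c r =>
      have hc : (!(c == '-')) = false := by
        have := List.head?_dropWhile_not (p := fun c => !(c == '-')) (l := l)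
        rw [hdw] at this
        simpa using this
      have hc' : c = '-' := by simpa using hc
      refine ⟨r, ?_⟩
      rw [← hsplit, hdw, hk, hc']
      simp

lemma pv_sw_eq (sl : String) (t td : String) (h : td.toList = t.toList ++ ['-'])
    (ht : '-' ∉ t.toList) :
    PySem.Str.startswith sl td =
      ((t == String.ofList (sl.toList.takeWhile (fun c => !(c == '-')))) && decide ('-' ∈ sl.toList)) := by
  rw [Bool.eq_iff_iff]
  simp only [PySem.Str.startswith_eq, PySem.Chars.startswith_iff, h, Bool.and_eq_true,
    beq_iff_eq, decide_eq_true_eq]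
  rw [pv_prefix_dash_iff _ _ ht]
  constructor
  · rintro ⟨hk, hm⟩
    exact ⟨by rw [hk]; simp, hm⟩
  · rintro ⟨hk, hm⟩
    refine ⟨?_, hm⟩
    rw [hk]
    simp

-- ===== VERDICT (by name: the statement is the Claim_ definition above) =====
theorem detect_league_from_slug_py_spec : Claim_equal_detect_league_from_slug_py := by
  intro slug tag_league _
  unfold Spec_detect_league_from_slug_py detect_league_from_slug_py detect_league_from_slug_py_alt
  simp only [pvScanA, pvSlugPrefix, pv_find?_cons_if, List.find?_nil,
    pv_sw_eq _ "nba" "nba-" (by decide) (by decide),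
    pv_sw_eq _ "nhl" "nhl-" (by decide) (by decide),
    pv_sw_eq _ "nfl" "nfl-" (by decide) (by decide),
    pv_sw_eq _ "mlb" "mlb-" (by decide) (by decide),
    pv_sw_eq _ "ufc" "ufc-" (by decide) (by decide),
    pv_sw_eq _ "wnba" "wnba-" (by decide) (by decide),
    pv_sw_eq _ "ncaab" "ncaab-" (by decide) (by decide),
    pv_sw_eq _ "ncaaf" "ncaaf-" (by decide) (by decide),
    pv_sw_eq _ "ncaaw" "ncaaw-" (by decide) (by decide)]
  by_cases hd : '-' ∈ (PySem.Str.lower slug).toList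
  · simp only [hd, decide_true, Bool.and_true]
    split_ifs <;> simp_all [beq_iff_eq]
  · simp only [hd, decide_false, Bool.and_false]
    simp
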